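-- pv_equiv track=rewrite | github.com/reut-bit/V-200_Keylink | scripts/scan_can1_mavlink.py | mavlink_crc
-- ===== SOURCE A (Python) =====
-- def mavlink_crc(buf):
--     """MAVLink CRC-16/MCRF4XX."""
--     crc = 0xFFFF
--     for b in buf:
--         tmp = b ^ (crc & 0xFF)
--         tmp ^= (tmp << 4) & 0xFF
--         crc = (crc >> 8) ^ (tmp << 8) ^ (tmp << 3) ^ (tmp >> 4)
--         crc &= 0xFFFF
--     return crc
-- ===== SOURCE B (Python) =====
-- # CRC-16/MCRF4XX as explicit GF(2) polynomial arithmetic: one byte step is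
-- # crc' = (crc >> 8) ^ (t*P >> 4) ^ ((t & 0xF)*P), with carry-less products by P.
-- POLY_REV = 0x1081  # bit-reversed image of the CCITT generator remainder x^12 + x^5 + 1
--
-- def clmul(x, m):
--     """Carry-less product: multiply x by m in GF(2)[x]."""
--     acc = 0
--     while m:
--         if m & 1:
--             acc ^= x
--         x <<= 1
--         m >>= 1
--     return acc
--
-- def mavlink_crc(buf):
--     """MAVLink CRC-16/MCRF4XX."""
--     crc = 0xFFFF
--     for b in buf:
--         t = b ^ (crc & 0xFF)
--         crc = ((crc >> 8) ^ (clmul(t, POLY_REV) >> 4) ^ clmul(t & 0xF, POLY_REV)) & 0xFFFF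
--     return crc
-- ===== Notes on version B (the rewrite author's own statement) =====
-- stated objective: alternative
-- what changed: Replaces A's flat shift/xor 'tmp trick' (tmp = t ^ (tmp<<4)&0xFF folded into three shifts) with an explicit GF(2) polynomial formulation: each step is crc' = (crc>>8) ^ (t*P >> 4) ^ ((t&0xF)*P) where P = 0x1081 and the products are computed by a bit-serial carry-less multiply loop.
import Mathlib
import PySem

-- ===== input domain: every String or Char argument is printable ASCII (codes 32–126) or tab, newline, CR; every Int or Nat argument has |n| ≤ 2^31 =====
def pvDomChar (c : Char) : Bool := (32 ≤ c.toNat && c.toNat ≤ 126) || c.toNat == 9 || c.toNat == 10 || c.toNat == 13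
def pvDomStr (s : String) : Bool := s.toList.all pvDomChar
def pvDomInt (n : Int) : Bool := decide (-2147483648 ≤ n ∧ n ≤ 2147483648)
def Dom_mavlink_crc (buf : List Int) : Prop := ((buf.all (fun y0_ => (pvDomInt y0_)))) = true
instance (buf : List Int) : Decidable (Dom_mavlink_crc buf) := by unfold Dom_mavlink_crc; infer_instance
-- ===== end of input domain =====

-- B replaces A's flat shift/xor 'tmp trick' with an explicit GF(2) polynomial
-- formulation of the same CRC step, computed by a bit-serial carry-less multiply
-- loop (objective: alternative algorithm, same O(n) cost).

-- ===== PORT A =====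
def mavStepA (crc b : Int) : Int :=
  let tmp := PySem.Int.bxor b (PySem.Int.band crc 0xFF)
  let tmp2 := PySem.Int.bxor tmp (PySem.Int.band (tmp <<< 4) 0xFF)
  PySem.Int.band
    (PySem.Int.bxor (PySem.Int.bxor (PySem.Int.bxor (crc >>> 8) (tmp2 <<< 8)) (tmp2 <<< 3)) (tmp2 >>> 4))
    0xFFFF

def mavlink_crc (buf : List Int) : Int := buf.foldl mavStepA 0xFFFF

-- ===== PORT B =====
-- Source B's clmul loop ('while m: if m & 1: acc ^= x; x <<= 1; m >>= 1'); the .toNat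
-- only makes the loop total — B calls it with the nonnegative literal 0x1081,
-- where the recursion is exactly Python's loop.
def clmulGo (acc x : Int) (m : Nat) : Int :=
  if _h : m = 0 then acc
  else clmulGo (if m % 2 = 1 then PySem.Int.bxor acc x else acc) (x <<< (1 : Int)) (m / 2)
termination_by m
decreasing_by omega

def clmul (x m : Int) : Int := clmulGo 0 x m.toNat

def mavStepB (crc b : Int) : Int :=
  let t := PySem.Int.bxor b (PySem.Int.band crc 0xFF)
  PySem.Int.band
    (PySem.Int.bxor (PySem.Int.bxor (crc >>> 8) ((clmul t 0x1081) >>> 4)) (clmul (PySem.Int.band t 0xF) 0x1081))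
    0xFFFF

def mavlink_crc_alt (buf : List Int) : Int := buf.foldl mavStepB 0xFFFF

-- ===== PRECONDITION & SPEC =====
def Spec_mavlink_crc (buf : List Int) (out : Int) : Prop := out = mavlink_crc_alt buf
instance (buf : List Int) (out : Int) : Decidable (Spec_mavlink_crc buf out) := by unfold Spec_mavlink_crc; infer_instance

-- ===== CLAIM (what is proved, stated in full; the proofs are below) =====
def Claim_equal_mavlink_crc : Prop := ∀ (buf : List Int), Dom_mavlink_crc buf → Spec_mavlink_crc buf (mavlink_crc buf)

-- ===== LEMMAS AND PROOFS =====

-- ---------- Nat helpers ----------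

theorem natXor_eq_add : ∀ (a b : Nat), a &&& b = 0 → a ^^^ b = a + b := by
  intro a
  induction a using Nat.strong_induction_on with
  | _ a ih =>
    intro b h
    rcases Nat.eq_zero_or_pos a with ha | ha
    · simp [ha]
    · have h2 : a / 2 &&& b / 2 = 0 := by rw [← Nat.and_div_two, h]
      have ihd := ih (a / 2) (by omega) (b / 2) h2
      have hbit : ¬(a % 2 = 1 ∧ b % 2 = 1) := by
        intro ⟨ha1, hb1⟩
        have := congrArg (fun x => x.testBit 0) h
        simp [Nat.testBit_zero, ha1, hb1] at this
      have key : (a ^^^ b) / 2 = a / 2 + b / 2 := by rw [Nat.xor_div_two, ihd]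
      have hxmod : (a ^^^ b) % 2 = (a + b) % 2 := Nat.xor_mod_two_eq
      omega

theorem natSub_and_eq_xor (m u : Nat) : m - (m &&& u) = m ^^^ (m &&& u) := by
  set d := m &&& u with hd
  have hmd : m &&& d = d := by
    rw [hd, ← Nat.and_assoc, Nat.and_self]
  have hdisj : (m ^^^ d) &&& d = 0 := by
    rw [Nat.and_xor_distrib_right, hmd, Nat.and_self, Nat.xor_self]
  have hadd : (m ^^^ d) + d = m := by
    rw [← natXor_eq_add _ _ hdisj, Nat.xor_assoc, Nat.xor_self, Nat.xor_zero]
  omega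

theorem natShiftLeft'_true_testBit (m : Nat) :
    ∀ (n k : Nat), (Nat.shiftLeft' true m n).testBit k = (decide (k < n) || m.testBit (k - n)) := by
  intro n
  induction n with
  | zero => intro k; simp [Nat.shiftLeft']
  | succ n ihn =>
    intro k
    cases k with
    | zero => simp [Nat.shiftLeft']
    | succ k =>
      rw [Nat.shiftLeft', Nat.testBit_bit_succ, ihn k, Nat.succ_sub_succ]
      by_cases h : k < n
      · simp [h]
      · simp [h]

-- ---------- Int two's-complement bit framework ----------

theorem negCast_sub_one (w : Nat) : -(w : Int) - 1 = Int.negSucc w := by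
  rw [Int.negSucc_eq]; ring

theorem intTestBit_ext {x y : Int} (h : ∀ k, x.testBit k = y.testBit k) : x = y := by
  cases x with
  | ofNat a =>
    cases y with
    | ofNat b =>
      exact congrArg Int.ofNat (Nat.eq_of_testBit_eq fun i => by simpa [Int.testBit] using h i)
    | negSucc v =>
      exfalso
      have ha : a.testBit (a + v) = false :=
        Nat.testBit_lt_two_pow (Nat.lt_of_lt_of_le Nat.lt_two_pow_self (Nat.pow_le_pow_right (by omega) (by omega)))
      have hv : v.testBit (a + v) = false :=
        Nat.testBit_lt_two_pow (Nat.lt_of_lt_of_le Nat.lt_two_pow_self (Nat.pow_le_pow_right (by omega) (by omega)))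
      have := h (a + v)
      simp [Int.testBit, ha, hv] at this
  | negSucc u =>
    cases y with
    | ofNat b =>
      exfalso
      have hb : b.testBit (b + u) = false :=
        Nat.testBit_lt_two_pow (Nat.lt_of_lt_of_le Nat.lt_two_pow_self (Nat.pow_le_pow_right (by omega) (by omega)))
      have hu : u.testBit (b + u) = false :=
        Nat.testBit_lt_two_pow (Nat.lt_of_lt_of_le Nat.lt_two_pow_self (Nat.pow_le_pow_right (by omega) (by omega)))
      have := h (b + u)
      simp [Int.testBit, hb, hu] at this
    | negSucc v =>
      refine congrArg Int.negSucc (Nat.eq_of_testBit_eq fun i => ?_)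
      have := h i
      simpa [Int.testBit] using this

theorem tb_bxor (x y : Int) (k : Nat) :
    (PySem.Int.bxor x y).testBit k = ((x.testBit k) ^^ (y.testBit k)) := by
  cases x with
  | ofNat a =>
    cases y with
    | ofNat b =>
      simp [PySem.Int.bxor, Int.testBit, Nat.testBit_xor]
    | negSucc v =>
      have : PySem.Int.bxor (Int.ofNat a) (Int.negSucc v) = Int.negSucc (a ^^^ v) := by
        simp [PySem.Int.bxor, Int.negSucc_not_nonneg, negCast_sub_one]
      rw [this]
      simp only [Int.testBit, Nat.testBit_xor]
      cases a.testBit k <;> cases v.testBit k <;> rfl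
  | negSucc u =>
    cases y with
    | ofNat b =>
      have : PySem.Int.bxor (Int.negSucc u) (Int.ofNat b) = Int.negSucc (u ^^^ b) := by
        simp [PySem.Int.bxor, Int.negSucc_not_nonneg, negCast_sub_one]
      rw [this]
      simp only [Int.testBit, Nat.testBit_xor]
      cases u.testBit k <;> cases b.testBit k <;> rfl
    | negSucc v =>
      have : PySem.Int.bxor (Int.negSucc u) (Int.negSucc v) = Int.ofNat (u ^^^ v) := by
        simp [PySem.Int.bxor, Int.negSucc_not_nonneg]
      rw [this]
      simp only [Int.testBit, Nat.testBit_xor]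
      cases u.testBit k <;> cases v.testBit k <;> rfl

theorem tb_band (x y : Int) (k : Nat) :
    (PySem.Int.band x y).testBit k = ((x.testBit k) && (y.testBit k)) := by
  cases x with
  | ofNat a =>
    cases y with
    | ofNat b =>
      simp [PySem.Int.band, Int.testBit, Nat.testBit_and]
    | negSucc v =>
      have : PySem.Int.band (Int.ofNat a) (Int.negSucc v) = Int.ofNat (a - (a &&& v)) := by
        simp [PySem.Int.band, Int.negSucc_not_nonneg]
      rw [this]
      simp only [Int.testBit, natSub_and_eq_xor, Nat.testBit_xor, Nat.testBit_and]
      cases a.testBit k <;> cases v.testBit k <;> rfl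
  | negSucc u =>
    cases y with
    | ofNat b =>
      have : PySem.Int.band (Int.negSucc u) (Int.ofNat b) = Int.ofNat (b - (b &&& u)) := by
        simp [PySem.Int.band, Int.negSucc_not_nonneg]
      rw [this]
      simp only [Int.testBit, natSub_and_eq_xor, Nat.testBit_xor, Nat.testBit_and]
      cases u.testBit k <;> cases b.testBit k <;> rfl
    | negSucc v =>
      have : PySem.Int.band (Int.negSucc u) (Int.negSucc v) = Int.negSucc (u ||| v) := by
        simp [PySem.Int.band, Int.negSucc_not_nonneg, negCast_sub_one]
      rw [this]
      simp only [Int.testBit, Nat.testBit_or]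
      cases u.testBit k <;> cases v.testBit k <;> rfl

theorem tb_shl (x : Int) (n k : Nat) :
    (x <<< (Int.ofNat n)).testBit k = (decide (n ≤ k) && x.testBit (k - n)) := by
  cases x with
  | ofNat a =>
    have : (Int.ofNat a) <<< (Int.ofNat n) = Int.ofNat (Nat.shiftLeft' false a n) := rfl
    rw [this]
    simp [Int.testBit, Nat.shiftLeft'_false, Nat.testBit_shiftLeft, ge_iff_le]
  | negSucc u =>
    have : (Int.negSucc u) <<< (Int.ofNat n) = Int.negSucc (Nat.shiftLeft' true u n) := rfl
    rw [this]
    simp only [Int.testBit, natShiftLeft'_true_testBit]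
    by_cases hk : n ≤ k
    · have : ¬ k < n := by omega
      simp [hk, this]
    · have : k < n := by omega
      simp [hk, this]

theorem shr_ofNat (m n : Nat) : (Int.ofNat m) >>> (Int.ofNat n) = Int.ofNat (m >>> n) := by
  cases n with
  | zero => rfl
  | succ k => rfl

theorem shr_negSucc (m n : Nat) : (Int.negSucc m) >>> (Int.ofNat n) = Int.negSucc (m >>> n) := by
  cases n with
  | zero => rfl
  | succ k => rfl

theorem tb_shr (x : Int) (n k : Nat) :
    (x >>> (Int.ofNat n)).testBit k = x.testBit (k + n) := by
  cases x with
  | ofNat a =>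
    rw [shr_ofNat]
    simp [Int.testBit, Nat.testBit_shiftRight, Nat.add_comm]
  | negSucc u =>
    rw [shr_negSucc]
    simp [Int.testBit, Nat.testBit_shiftRight, Nat.add_comm]

theorem tb_255 (k : Nat) : (255 : Int).testBit k = decide (k < 8) := by
  have h : (255 : Int) = Int.ofNat 255 := rfl
  rw [h]
  show Nat.testBit 255 k = decide (k < 8)
  rw [show (255 : Nat) = 2 ^ 8 - 1 by norm_num, Nat.testBit_two_pow_sub_one]

theorem tb_15 (k : Nat) : (15 : Int).testBit k = decide (k < 4) := by
  have h : (15 : Int) = Int.ofNat 15 := rfl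
  rw [h]
  show Nat.testBit 15 k = decide (k < 4)
  rw [show (15 : Nat) = 2 ^ 4 - 1 by norm_num, Nat.testBit_two_pow_sub_one]

-- ---------- derived xor/shift algebra ----------

theorem bxor_assoc (x y z : Int) :
    PySem.Int.bxor (PySem.Int.bxor x y) z = PySem.Int.bxor x (PySem.Int.bxor y z) := by
  apply intTestBit_ext; intro k
  simp only [tb_bxor, Bool.xor_assoc]

theorem bxor_left_comm (x y z : Int) :
    PySem.Int.bxor x (PySem.Int.bxor y z) = PySem.Int.bxor y (PySem.Int.bxor x z) := by
  rw [← bxor_assoc, PySem.Int.bxor_comm x y, bxor_assoc]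

theorem zero_bxor (x : Int) : PySem.Int.bxor 0 x = x := by
  rw [PySem.Int.bxor_comm, PySem.Int.bxor_zero]

theorem shl_bxor (x y : Int) (n : Nat) :
    (PySem.Int.bxor x y) <<< (Int.ofNat n) =
      PySem.Int.bxor (x <<< (Int.ofNat n)) (y <<< (Int.ofNat n)) := by
  apply intTestBit_ext; intro k
  simp only [tb_bxor, tb_shl]
  cases decide (n ≤ k) <;> simp

theorem shr_bxor (x y : Int) (n : Nat) :
    (PySem.Int.bxor x y) >>> (Int.ofNat n) =
      PySem.Int.bxor (x >>> (Int.ofNat n)) (y >>> (Int.ofNat n)) := by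
  apply intTestBit_ext; intro k
  simp only [tb_bxor, tb_shr]

theorem shl_shl (x : Int) (m n : Nat) :
    (x <<< (Int.ofNat m)) <<< (Int.ofNat n) = x <<< (Int.ofNat (m + n)) := by
  apply intTestBit_ext; intro k
  simp only [tb_shl]
  by_cases h1 : n ≤ k
  · by_cases h2 : m ≤ k - n
    · have h3 : m + n ≤ k := by omega
      have h4 : k - n - m = k - (m + n) := by omega
      simp [h1, h2, h3, h4]
    · have h3 : ¬ (m + n ≤ k) := by omega
      simp [h1, h2, h3]
  · have h3 : ¬ (m + n ≤ k) := by omega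
    simp [h1, h3]

theorem shl_shr (x : Int) (m n : Nat) (h : n ≤ m) :
    (x <<< (Int.ofNat m)) >>> (Int.ofNat n) = x <<< (Int.ofNat (m - n)) := by
  apply intTestBit_ext; intro k
  simp only [tb_shr, tb_shl]
  by_cases h1 : m - n ≤ k
  · have h2 : m ≤ k + n := by omega
    have h3 : k + n - m = k - (m - n) := by omega
    simp [h1, h2, h3]
  · have h2 : ¬ (m ≤ k + n) := by omega
    simp [h1, h2]

theorem shl_zero (x : Int) : x <<< (Int.ofNat 0) = x := by
  apply intTestBit_ext; intro k
  rw [tb_shl x 0 k]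
  simp

-- (t << 4) & 0xFF keeps exactly the low nibble of t, moved up: it is (t & 0xF) << 4
theorem mask_shl4 (t : Int) :
    PySem.Int.band (t <<< (4 : Int)) 255 = (PySem.Int.band t 15) <<< (4 : Int) := by
  apply intTestBit_ext; intro k
  rw [show ((4 : Int)) = Int.ofNat 4 from rfl]
  simp only [tb_band, tb_shl, tb_255, tb_15]
  by_cases h1 : 4 ≤ k
  · by_cases h2 : k < 8
    · have h3 : k - 4 < 4 := by omega
      simp [h1, h2, h3]
    · have h3 : ¬ (k - 4 < 4) := by omega
      simp [h1, h2, h3]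
  · simp [h1]

-- the carry-less product by the literal 0x1081 = x^12 + x^7 + 1
theorem clmul_eq (x : Int) :
    clmul x 4225 = PySem.Int.bxor (PySem.Int.bxor x (x <<< (7 : Int))) (x <<< (12 : Int)) := by
  have h : clmul x 4225 =
      PySem.Int.bxor (PySem.Int.bxor (PySem.Int.bxor 0 x)
        (((((((x <<< (1:Int)) <<< (1:Int)) <<< (1:Int)) <<< (1:Int)) <<< (1:Int)) <<< (1:Int)) <<< (1:Int)))
        ((((((((((((x <<< (1:Int)) <<< (1:Int)) <<< (1:Int)) <<< (1:Int)) <<< (1:Int)) <<< (1:Int)) <<< (1:Int)) <<< (1:Int)) <<< (1:Int)) <<< (1:Int)) <<< (1:Int)) <<< (1:Int)) := by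
    rw [clmul, show ((4225:Int)).toNat = 4225 from rfl]
    rw [clmulGo.eq_def]; norm_num
    rw [clmulGo.eq_def]; norm_num
    rw [clmulGo.eq_def]; norm_num
    rw [clmulGo.eq_def]; norm_num
    rw [clmulGo.eq_def]; norm_num
    rw [clmulGo.eq_def]; norm_num
    rw [clmulGo.eq_def]; norm_num
    rw [clmulGo.eq_def]; norm_num
    rw [clmulGo.eq_def]; norm_num
    rw [clmulGo.eq_def]; norm_num
    rw [clmulGo.eq_def]; norm_num
    rw [clmulGo.eq_def]; norm_num
    rw [clmulGo.eq_def]; norm_num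
    rw [clmulGo.eq_def]; norm_num
  have s1 : ∀ (y : Int) (a : Nat), (y <<< (Int.ofNat a)) <<< ((1:Int)) = y <<< (Int.ofNat (a + 1)) :=
    fun y a => shl_shl y a 1
  rw [h, zero_bxor]
  congr 1
  · congr 1
    rw [show (x <<< (1:Int)) = x <<< (Int.ofNat 1) from rfl, s1, s1, s1, s1, s1, s1]
    norm_num
  · rw [show (x <<< (1:Int)) = x <<< (Int.ofNat 1) from rfl, s1, s1, s1, s1, s1, s1, s1, s1, s1, s1, s1]
    norm_num

-- composed-shift collapses at the literal amounts the step needs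
theorem comp_48 (u : Int) : (u <<< (Int.ofNat 4)) <<< (Int.ofNat 8) = u <<< (Int.ofNat 12) := by
  rw [shl_shl u 4 8]

theorem comp_43 (u : Int) : (u <<< (Int.ofNat 4)) <<< (Int.ofNat 3) = u <<< (Int.ofNat 7) := by
  rw [shl_shl u 4 3]

theorem comp_44 (u : Int) : (u <<< (Int.ofNat 4)) >>> (Int.ofNat 4) = u := by
  rw [shl_shr u 4 4 (by omega), show Int.ofNat (4 - 4) = Int.ofNat 0 from rfl, shl_zero]

theorem comp_74 (t : Int) : (t <<< (Int.ofNat 7)) >>> (Int.ofNat 4) = t <<< (Int.ofNat 3) := by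
  rw [shl_shr t 7 4 (by omega)]

theorem comp_124 (t : Int) : (t <<< (Int.ofNat 12)) >>> (Int.ofNat 4) = t <<< (Int.ofNat 8) := by
  rw [shl_shr t 12 4 (by omega)]

-- ---------- the per-element steps agree on every crc and every element ----------

theorem step_eq (crc b : Int) : mavStepA crc b = mavStepB crc b := by
  show PySem.Int.band _ 0xFFFF = PySem.Int.band _ 0xFFFF
  congr 1
  set t := PySem.Int.bxor b (PySem.Int.band crc 0xFF) with ht
  set u := PySem.Int.band t 15 with hu
  rw [mask_shl4, ← hu, clmul_eq, clmul_eq]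
  rw [show ((3:Int)) = Int.ofNat 3 from rfl, show ((4:Int)) = Int.ofNat 4 from rfl,
    show ((7:Int)) = Int.ofNat 7 from rfl, show ((8:Int)) = Int.ofNat 8 from rfl,
    show ((12:Int)) = Int.ofNat 12 from rfl]
  rw [shl_bxor t (u <<< Int.ofNat 4) 8, shl_bxor t (u <<< Int.ofNat 4) 3,
    shr_bxor t (u <<< Int.ofNat 4) 4,
    shr_bxor (PySem.Int.bxor t (t <<< Int.ofNat 7)) (t <<< Int.ofNat 12) 4,
    shr_bxor t (t <<< Int.ofNat 7) 4,
    comp_48, comp_43, comp_44, comp_74, comp_124]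
  simp only [bxor_assoc]
  simp only [bxor_left_comm, PySem.Int.bxor_comm]

-- ===== VERDICT (by name: the statement is the Claim_ definition above) =====
theorem mavlink_crc_spec : Claim_equal_mavlink_crc := by
  intro buf _
  unfold Spec_mavlink_crc mavlink_crc mavlink_crc_alt
  rw [show mavStepA = mavStepB from funext fun c => funext fun b => step_eq c b]
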